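-- pv_equiv track=rewrite | github.com/Chetic/chunksilo | src/chunksilo/search.py | _char_offset_to_line
-- ===== SOURCE A (Python) =====
-- def _char_offset_to_line(char_offset: int | None, line_offsets: list[int] | None) -> int | None:
--     """Convert a character offset to a line number (1-indexed)."""
--     if char_offset is None or not line_offsets:
--         return None
--
--     left, right = 0, len(line_offsets) - 1
--     while left < right:
--         mid = (left + right + 1) // 2
--         if line_offsets[mid] <= char_offset:
--             left = mid
--         else:
--             right = mid - 1
--
--     return left + 1
-- ===== SOURCE B (Python) =====
-- def _char_offset_to_line(char_offset: int | None, line_offsets: list[int] | None) -> int | None: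
--     """Convert a character offset to a line number (1-indexed)."""
--     if char_offset is None or not line_offsets:
--         return None
--     line = 1
--     for i, off in enumerate(line_offsets):
--         if off <= char_offset:
--             line = i + 1
--         else:
--             break
--     return line
-- ===== Notes on version B (the rewrite author's own statement) =====
-- stated objective: simpler
-- what changed: Replaces the binary search over index bounds with a single linear forward scan that records i+1 for each leading offset <= char_offset and stops at the first larger one.
-- outside the precondition, e.g. on _char_offset_to_line(5, [10, 0]): A returns 2, B returns 1
import Mathlib
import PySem

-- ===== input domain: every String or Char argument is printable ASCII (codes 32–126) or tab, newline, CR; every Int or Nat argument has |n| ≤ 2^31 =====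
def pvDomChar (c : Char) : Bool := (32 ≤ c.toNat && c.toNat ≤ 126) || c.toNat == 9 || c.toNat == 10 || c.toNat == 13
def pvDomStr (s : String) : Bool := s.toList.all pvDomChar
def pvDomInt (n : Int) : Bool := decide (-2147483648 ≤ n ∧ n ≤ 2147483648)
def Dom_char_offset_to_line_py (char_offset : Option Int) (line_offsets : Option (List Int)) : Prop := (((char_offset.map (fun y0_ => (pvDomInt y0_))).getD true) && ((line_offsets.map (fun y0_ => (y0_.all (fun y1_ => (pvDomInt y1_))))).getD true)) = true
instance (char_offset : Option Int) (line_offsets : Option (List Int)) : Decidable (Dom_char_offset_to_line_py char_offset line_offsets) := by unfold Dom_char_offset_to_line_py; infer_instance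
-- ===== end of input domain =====

-- B replaces A's binary search by a single linear forward scan (simpler; not faster).

-- ===== PORT A =====

-- midpoint bounds needed by the loop's termination argument
theorem pvMidBounds (left right : Int) (h : left < right) :
    left < PySem.Int.floordiv (left + right + 1) 2 ∧
      PySem.Int.floordiv (left + right + 1) 2 ≤ right := by
  rw [PySem.Int.floordiv_eq_ediv_of_pos (by omega : (0:Int) < 2)]
  omega

-- the 'while left < right' loop of A; pyGet? none = IndexError (unreachable from A's initial bounds)
def pvLoopA (l : List Int) (co : Int) (left right : Int) : Option Int :=
  if h : left < right then
    let mid := PySem.Int.floordiv (left + right + 1) 2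
    match PySem.List.pyGet? l mid with
    | some v => if v ≤ co then pvLoopA l co mid right else pvLoopA l co left (mid - 1)
    | none => none
  else
    some (left + 1)
termination_by (right - left).toNat
decreasing_by
  · have hm := pvMidBounds left right h; omega
  · have hm := pvMidBounds left right h; omega

def char_offset_to_line_py (char_offset : Option Int) (line_offsets : Option (List Int)) : Option Int :=
  match char_offset, line_offsets with
  | none, _ => none
  | _, none => none
  | some c, some l =>
    if l = [] then none
    else pvLoopA l c 0 ((l.length : Int) - 1)

-- ===== PORT B =====

-- the 'for i, off in enumerate(line_offsets)' scan of B, with break on the first offset > char_offset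
def pvLoopB (co : Int) (l : List Int) (i : Int) (line : Int) : Int :=
  match l with
  | [] => line
  | x :: rest => if x ≤ co then pvLoopB co rest (i + 1) (i + 1) else line

def char_offset_to_line_py_alt (char_offset : Option Int) (line_offsets : Option (List Int)) : Option Int :=
  match char_offset, line_offsets with
  | none, _ => none
  | _, none => none
  | some c, some l =>
    if l = [] then none
    else some (pvLoopB c l 0 1)

-- ===== PRECONDITION & SPEC =====
-- Pre_ excludes only the inputs where the offsets ≤ char_offset do not form a prefix of
-- line_offsets — possible only for an unsorted list, outside the function's domain of sorted
-- line-start offsets — where A's binary-search descent returns an accidental value no caller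
-- could rely on (B's linear scan is as defensible there).
def Pre_char_offset_to_line_py (char_offset : Option Int) (line_offsets : Option (List Int)) : Prop :=
  (match char_offset, line_offsets with
   | some c, some l => decide (l.Pairwise (fun a b => b ≤ c → a ≤ c))
   | _, _ => true) = true
instance (char_offset : Option Int) (line_offsets : Option (List Int)) : Decidable (Pre_char_offset_to_line_py char_offset line_offsets) := by unfold Pre_char_offset_to_line_py; infer_instance

def pvWitness_char_offset_to_line_py : Option Int × Option (List Int) := (some 5, some [0, 3, 7])

def Spec_char_offset_to_line_py (char_offset : Option Int) (line_offsets : Option (List Int)) (out : Option Int) : Prop := out = char_offset_to_line_py_alt char_offset line_offsets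
instance (char_offset : Option Int) (line_offsets : Option (List Int)) (out : Option Int) : Decidable (Spec_char_offset_to_line_py char_offset line_offsets out) := by unfold Spec_char_offset_to_line_py; infer_instance

-- ===== CLAIM (what is proved, stated in full; the proofs are below) =====
def Claim_equal_char_offset_to_line_py : Prop := ∀ (char_offset : Option Int) (line_offsets : Option (List Int)), Dom_char_offset_to_line_py char_offset line_offsets → Pre_char_offset_to_line_py char_offset line_offsets → Spec_char_offset_to_line_py char_offset line_offsets (char_offset_to_line_py char_offset line_offsets)

-- ===== LEMMAS AND PROOFS =====

-- k = number of leading offsets ≤ co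
def pvK (co : Int) (l : List Int) : Nat := (l.takeWhile (fun x => decide (x ≤ co))).length

theorem pvK_facts (co : Int) (l : List Int) :
    pvK co l ≤ l.length ∧
    (∀ i, ∀ _ : i < l.length, i < pvK co l → l[i] ≤ co) ∧
    (∀ _ : pvK co l < l.length, ¬ l[pvK co l] ≤ co) := by
  induction l with
  | nil => simp [pvK]
  | cons x rest ih =>
    obtain ⟨ih1, ih2, ih3⟩ := ih
    by_cases hx : x ≤ co
    · have hk : pvK co (x :: rest) = pvK co rest + 1 := by
        simp [pvK, hx]
      refine ⟨by simp [hk]; omega, ?_, ?_⟩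
      · intro i hil hik
        rw [hk] at hik
        match i with
        | 0 => simpa using hx
        | Nat.succ j => simpa using ih2 j (by simpa using hil) (by omega)
      · intro hlen
        rw [hk] at hlen
        simp only [hk, List.getElem_cons_succ]
        exact ih3 (by simpa using hlen)
    · have hk : pvK co (x :: rest) = 0 := by
        simp [pvK, hx]
      refine ⟨by omega, ?_, ?_⟩
      · intro i hil hik; omega
      · intro hlen
        simp only [hk, List.getElem_cons_zero]
        simpa using hx

theorem pv_ge_k (co : Int) (l : List Int) (hs : l.Pairwise (fun a b => b ≤ co → a ≤ co))
    (i : Nat) (hk : pvK co l ≤ i) (hil : i < l.length) : co < l[i] := by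
  obtain ⟨h1, h2, h3⟩ := pvK_facts co l
  have hfail := h3 (by omega)
  rcases Nat.eq_or_lt_of_le hk with heq | hlt
  · subst heq; omega
  · rw [List.pairwise_iff_getElem] at hs
    by_contra hco
    exact hfail (hs (pvK co l) i (by omega) hil hlt (by omega))

theorem pvLoopB_eq (co : Int) (l : List Int) : ∀ (i line : Int),
    pvLoopB co l i line = if pvK co l = 0 then line else i + (pvK co l : Int) := by
  induction l with
  | nil => intro i line; simp [pvLoopB, pvK]
  | cons x rest ih =>
    intro i line
    by_cases hx : x ≤ co
    · have hk : pvK co (x :: rest) = pvK co rest + 1 := by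
        simp [pvK, hx]
      rw [pvLoopB, if_pos hx, ih, hk]
      by_cases h0 : pvK co rest = 0
      · simp [h0]
      · rw [if_neg h0, if_neg (by omega)]
        push_cast
        ring
    · have hk : pvK co (x :: rest) = 0 := by
        simp [pvK, hx]
      rw [pvLoopB, if_neg hx, hk]
      simp

theorem pvLoopA_eq (co : Int) (l : List Int) (hs : l.Pairwise (fun a b => b ≤ co → a ≤ co)) :
    ∀ (n : Nat) (left right : Int), (right - left).toNat ≤ n →
      0 ≤ left → left ≤ right → right < (l.length : Int) →
      (pvK co l = 0 → left = 0) →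
      (0 < pvK co l → left ≤ (pvK co l : Int) - 1 ∧ (pvK co l : Int) - 1 ≤ right) →
      pvLoopA l co left right = some (if pvK co l = 0 then 1 else (pvK co l : Int)) := by
  intro n
  induction n with
  | zero =>
    intro left right hfuel h0 hlr hrn hk0 hkpos
    rw [pvLoopA, dif_neg (by omega : ¬ left < right)]
    by_cases hk : pvK co l = 0
    · simp [hk, hk0 hk]
    · have hb := hkpos (Nat.pos_of_ne_zero hk)
      have hl : left = (pvK co l : Int) - 1 := by omega
      rw [if_neg hk, hl]
      exact congrArg some (by ring)
  | succ n ih =>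
    intro left right hfuel h0 hlr hrn hk0 hkpos
    by_cases h : left < right
    · obtain ⟨hm1, hm2⟩ := pvMidBounds left right h
      have hget := PySem.List.pyGet?_eq_some_getElem l
        (i := PySem.Int.floordiv (left + right + 1) 2) (by omega) (by omega)
      rw [pvLoopA, dif_pos h]
      simp only [hget]
      by_cases hv : l[(PySem.Int.floordiv (left + right + 1) 2).toNat]'(by omega) ≤ co
      · simp only [if_pos hv]
        have hmk : (PySem.Int.floordiv (left + right + 1) 2).toNat < pvK co l := by
          by_contra hge
          have := pv_ge_k co l hs (PySem.Int.floordiv (left + right + 1) 2).toNat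
            (by omega) (by omega)
          exact absurd hv (not_le.mpr this)
        exact ih _ right (by omega) (by omega) (by omega) hrn
          (by intro hkz; omega) (by intro _; omega)
      · simp only [if_neg hv]
        have hmk : pvK co l ≤ (PySem.Int.floordiv (left + right + 1) 2).toNat := by
          by_contra hlt
          exact hv ((pvK_facts co l).2.1 _ (by omega) (by omega))
        exact ih left _ (by omega) h0 (by omega) (by omega) hk0
          (by intro hp; have := hkpos hp; omega)
    · rw [pvLoopA, dif_neg h]
      by_cases hk : pvK co l = 0
      · simp [hk, hk0 hk]
      · have hb := hkpos (Nat.pos_of_ne_zero hk)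
        have hl : left = (pvK co l : Int) - 1 := by omega
        rw [if_neg hk, hl]
        exact congrArg some (by ring)

-- ===== VERDICT (by name: the statement is the Claim_ definition above) =====
theorem char_offset_to_line_py_spec : Claim_equal_char_offset_to_line_py := by
  intro char_offset line_offsets _ hpre
  unfold Spec_char_offset_to_line_py
  match char_offset, line_offsets with
  | none, none => rfl
  | none, some l => rfl
  | some c, none => rfl
  | some c, some l =>
    unfold char_offset_to_line_py char_offset_to_line_py_alt
    by_cases hnil : l = []
    · simp [hnil]
    · simp only [if_neg hnil]
      have hlen : 0 < l.length := List.length_pos_of_ne_nil hnil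
      have hs : l.Pairwise (fun a b => b ≤ c → a ≤ c) := by
        simpa [Pre_char_offset_to_line_py] using hpre
      have hkle := (pvK_facts c l).1
      rw [pvLoopA_eq c l hs ((l.length : Int) - 1).toNat 0 ((l.length : Int) - 1)
          (by omega) (le_refl _) (by omega) (by omega)
          (fun _ => rfl) (by intro hp; omega),
        pvLoopB_eq c l 0 1]
      by_cases hk0 : pvK c l = 0 <;> simp [hk0]
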